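-- pv_equiv track=rewrite | github.com/zggl404/ace-compiler | air-infra/plugin/dsl_pybind11/instantiator_ckks/cheby_ctx.py | get_degree_from_coeffs
-- ===== SOURCE A (Python) =====
-- def get_degree_from_coeffs(coeffs):
--     if len(coeffs) == 0:
--         return 0
--     deg = 1
--     for item in coeffs[::-1]:
--         if item == 0:
--             deg += 1
--         else:
--             break
--     return len(coeffs) - deg
-- ===== SOURCE B (Python) =====
-- def get_degree_from_coeffs(coeffs):
--     if len(coeffs) == 0:
--         return 0
--     deg = -1
--     for i, item in enumerate(coeffs):
--         if item != 0:
--             deg = i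
--     return deg
-- ===== Notes on version B (the rewrite author's own statement) =====
-- stated objective: alternative
-- what changed: Replaces the backward scan that counts trailing zeros with an early break and subtracts from the length by a single forward enumerate pass tracking the last nonzero index.
import Mathlib
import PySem

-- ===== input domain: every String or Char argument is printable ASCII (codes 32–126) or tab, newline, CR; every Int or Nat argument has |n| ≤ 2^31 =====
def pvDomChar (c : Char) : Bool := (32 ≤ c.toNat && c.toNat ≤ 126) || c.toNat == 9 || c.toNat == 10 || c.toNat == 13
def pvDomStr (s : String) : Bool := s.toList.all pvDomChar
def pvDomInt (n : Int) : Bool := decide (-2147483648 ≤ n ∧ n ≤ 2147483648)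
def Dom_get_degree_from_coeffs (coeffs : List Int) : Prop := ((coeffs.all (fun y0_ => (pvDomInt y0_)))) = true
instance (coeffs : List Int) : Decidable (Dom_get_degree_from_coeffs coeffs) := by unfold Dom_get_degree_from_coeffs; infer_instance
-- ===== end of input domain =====

-- B replaces A's backward trailing-zero count (with early break) by a single forward pass tracking the last nonzero index; alternative decomposition, same cost.


-- ===== PORT A =====
-- the 'for item in coeffs[::-1]: if item == 0: deg += 1 else: break' loop (coeffs[::-1] = reverse)
def aLoop : List Int → Int → Int
  | [], deg => deg
  | item :: rest, deg => if item = 0 then aLoop rest (deg + 1) else deg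

def get_degree_from_coeffs (coeffs : List Int) : Int :=
  if coeffs.length = 0 then 0
  else (coeffs.length : Int) - aLoop coeffs.reverse 1

-- ===== PORT B =====
-- the 'for i, item in enumerate(coeffs): if item != 0: deg = i' loop, carrying the index i
def bLoop : Int → Int → List Int → Int
  | _, deg, [] => deg
  | i, deg, item :: rest => bLoop (i + 1) (if item ≠ 0 then i else deg) rest

def get_degree_from_coeffs_alt (coeffs : List Int) : Int :=
  if coeffs.length = 0 then 0
  else bLoop 0 (-1) coeffs

-- ===== PRECONDITION & SPEC =====
def Spec_get_degree_from_coeffs (coeffs : List Int) (out : Int) : Prop := out = get_degree_from_coeffs_alt coeffs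
instance (coeffs : List Int) (out : Int) : Decidable (Spec_get_degree_from_coeffs coeffs out) := by unfold Spec_get_degree_from_coeffs; infer_instance

-- ===== CLAIM (what is proved, stated in full; the proofs are below) =====
def Claim_equal_get_degree_from_coeffs : Prop := ∀ (coeffs : List Int), Dom_get_degree_from_coeffs coeffs → Spec_get_degree_from_coeffs coeffs (get_degree_from_coeffs coeffs)

-- ===== LEMMAS AND PROOFS =====

theorem aLoop_shift (r : List Int) (d : Int) : aLoop r d = aLoop r 0 + d := by
  induction r generalizing d with
  | nil => simp [aLoop]
  | cons x rest ih =>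
    by_cases hx : x = 0
    · simp only [aLoop, if_pos hx]
      rw [ih (d + 1), ih (0 + 1)]; ring
    · simp [aLoop, hx]

theorem bLoop_append (m n : List Int) (i d : Int) :
    bLoop i d (m ++ n) = bLoop (i + m.length) (bLoop i d m) n := by
  induction m generalizing i d with
  | nil => simp [bLoop]
  | cons x rest ih =>
    simp only [List.cons_append, bLoop, ih]
    congr 1
    simp only [List.length_cons]; push_cast; ring

theorem main_eq (l : List Int) (hl : l ≠ []) :
    (l.length : Int) - aLoop l.reverse 1 = bLoop 0 (-1) l := by
  induction l using List.reverseRecOn with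
  | nil => exact absurd rfl hl
  | append_singleton m x ih =>
    rw [List.reverse_append, List.reverse_singleton, List.singleton_append]
    rw [bLoop_append]
    by_cases hx : x = 0
    · subst hx
      simp only [aLoop, bLoop, reduceIte, if_neg (by simp : ¬ (0:Int) ≠ 0)]
      rw [show (1:Int) + 1 = 2 from rfl, aLoop_shift m.reverse 2]
      cases m with
      | nil => simp [aLoop, bLoop]
      | cons y rest =>
        have h := ih (by simp)
        rw [aLoop_shift _ 1] at h
        rw [← h]
        simp only [List.length_append, List.length_singleton]
        push_cast; ring
    · simp only [aLoop, if_neg hx, bLoop, if_pos hx]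
      simp only [List.length_append, List.length_singleton]
      push_cast; ring

-- ===== VERDICT (by name: the statement is the Claim_ definition above) =====
theorem get_degree_from_coeffs_spec : Claim_equal_get_degree_from_coeffs := by
  intro coeffs _
  unfold Spec_get_degree_from_coeffs get_degree_from_coeffs get_degree_from_coeffs_alt
  cases coeffs with
  | nil => simp
  | cons x rest =>
    simp only [List.length_cons, if_neg (by omega : ¬ (rest.length + 1 = 0))]
    exact main_eq (x :: rest) (by simp)
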